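-- pv_equiv track=rewrite | github.com/liny0088/intern_codes | VarBinHelper.py | find_turn_count
-- ===== SOURCE A (Python) =====
-- def find_turn_count(sr):
--     ## function to find the longest monotonically decreasing / increasing bad rates in a list
--     ## called by self.force_monotone()
--     turn_count = 0
--     if len(sr) <= 2:
--         return 0
--
--     for idx in range(1, len(sr) - 1):
--         # if it is a turning point
--         if (sr[idx - 1] > sr[idx] and sr[idx] < sr[idx + 1]) or (sr[idx - 1] < sr[idx] and sr[idx] > sr[idx + 1]):
--             turn_count += 1
--
--     return turn_count
-- ===== SOURCE B (Python) =====
-- def find_turn_count(sr):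
--     # slope signs between neighbours: 1 up, -1 down, 0 flat (comparisons only)
--     signs = [(1 if x < y else (-1 if x > y else 0)) for x, y in zip(sr, sr[1:])]
--     # a turning point is exactly a strictly opposite consecutive slope pair
--     return sum(1 for a, b in zip(signs, signs[1:]) if a * b == -1)
-- ===== Notes on version B (the rewrite author's own statement) =====
-- stated objective: alternative
-- what changed: B replaces the index loop testing the four-comparison turning-point condition per position with a two-stage decomposition: first a slope-sign list over adjacent pairs, then a count of consecutive sign pairs whose product is -1.
import Mathlib
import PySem

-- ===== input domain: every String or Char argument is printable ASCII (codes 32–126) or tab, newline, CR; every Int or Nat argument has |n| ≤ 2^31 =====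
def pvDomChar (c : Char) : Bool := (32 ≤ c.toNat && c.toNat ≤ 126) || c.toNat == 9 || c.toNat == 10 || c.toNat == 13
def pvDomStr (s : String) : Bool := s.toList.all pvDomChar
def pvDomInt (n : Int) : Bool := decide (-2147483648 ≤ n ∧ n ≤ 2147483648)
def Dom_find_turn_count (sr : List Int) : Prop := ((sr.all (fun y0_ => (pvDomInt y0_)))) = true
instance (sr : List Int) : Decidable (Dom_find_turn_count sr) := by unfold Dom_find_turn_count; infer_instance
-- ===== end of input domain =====

-- B changes the decomposition: a slope-sign list followed by a count of opposite-sign pairs, instead of A's indexed four-comparison test; same O(n) cost.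

-- ===== PORT A =====
def find_turn_count (sr : List Int) : Int :=
  if sr.length ≤ 2 then 0
  else
    (PySem.List.pyRange 1 ((sr.length : Int) - 1) 1).foldl
      (fun turn_count idx =>
        if (PySem.List.pyGetD sr (idx - 1) 0 > PySem.List.pyGetD sr idx 0 ∧ PySem.List.pyGetD sr idx 0 < PySem.List.pyGetD sr (idx + 1) 0) ∨
           (PySem.List.pyGetD sr (idx - 1) 0 < PySem.List.pyGetD sr idx 0 ∧ PySem.List.pyGetD sr idx 0 > PySem.List.pyGetD sr (idx + 1) 0)
        then turn_count + 1 else turn_count) 0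

-- ===== PORT B =====
def find_turn_count_alt (sr : List Int) : Int :=
  let signs := (sr.zip sr.tail).map (fun p => if p.1 < p.2 then (1 : Int) else if p.1 > p.2 then -1 else 0)
  ((signs.zip signs.tail).countP (fun p => p.1 * p.2 == -1) : Int)

-- ===== PRECONDITION & SPEC =====
def Spec_find_turn_count (sr : List Int) (out : Int) : Prop := out = find_turn_count_alt sr
instance (sr : List Int) (out : Int) : Decidable (Spec_find_turn_count sr out) := by unfold Spec_find_turn_count; infer_instance

-- ===== CLAIM (what is proved, stated in full; the proofs are below) =====
def Claim_equal_find_turn_count : Prop := ∀ (sr : List Int), Dom_find_turn_count sr → Spec_find_turn_count sr (find_turn_count sr)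

-- ===== LEMMAS AND PROOFS =====

/-- Reference recursion on triples: the common value of both ports. -/
def turnSum : List Int → Int
  | a :: b :: c :: t => (if (a > b ∧ b < c) ∨ (a < b ∧ b > c) then 1 else 0) + turnSum (b :: c :: t)
  | _ => 0

lemma alt_eq_turnSum (sr : List Int) : find_turn_count_alt sr = turnSum sr := by
  induction sr using turnSum.induct with
  | case1 a b c t ih =>
    simp only [find_turn_count_alt, List.tail, List.zip, List.zipWith, List.map, List.countP_cons,
      turnSum] at *
    rw [← ih]
    rcases lt_trichotomy a b with h1 | h1 | h1 <;> rcases lt_trichotomy b c with h2 | h2 | h2 <;>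
      simp [h1, h2, lt_asymm] <;> omega
  | case2 x hx =>
    match x with
    | [] => rfl
    | [a] => rfl
    | [a, b] => rfl
    | a :: b :: c :: t => exact (hx a b c t rfl).elim

lemma a_sum (sr : List Int) (h : ¬ sr.length ≤ 2) :
    find_turn_count sr =
      ((List.range (sr.length - 2)).map
        (fun k => if (sr.getD k 0 > sr.getD (k+1) 0 ∧ sr.getD (k+1) 0 < sr.getD (k+2) 0) ∨
                     (sr.getD k 0 < sr.getD (k+1) 0 ∧ sr.getD (k+1) 0 > sr.getD (k+2) 0)
                  then (1:Int) else 0)).sum := by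
  rw [find_turn_count, if_neg h]
  have hstep : (fun (turn_count idx : Int) =>
      if (PySem.List.pyGetD sr (idx - 1) 0 > PySem.List.pyGetD sr idx 0 ∧
            PySem.List.pyGetD sr idx 0 < PySem.List.pyGetD sr (idx + 1) 0) ∨
         (PySem.List.pyGetD sr (idx - 1) 0 < PySem.List.pyGetD sr idx 0 ∧
            PySem.List.pyGetD sr idx 0 > PySem.List.pyGetD sr (idx + 1) 0)
      then turn_count + 1 else turn_count)
      = fun turn_count idx => turn_count +
          (if (PySem.List.pyGetD sr (idx - 1) 0 > PySem.List.pyGetD sr idx 0 ∧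
                PySem.List.pyGetD sr idx 0 < PySem.List.pyGetD sr (idx + 1) 0) ∨
              (PySem.List.pyGetD sr (idx - 1) 0 < PySem.List.pyGetD sr idx 0 ∧
                PySem.List.pyGetD sr idx 0 > PySem.List.pyGetD sr (idx + 1) 0)
           then (1:Int) else 0) := by
    funext acc idx; split <;> simp
  rw [hstep, PySem.List.foldl_add, PySem.List.pyRange_one, List.map_map, zero_add]
  have hlen : ((sr.length : Int) - 1 - 1).toNat = sr.length - 2 := by omega
  rw [hlen]
  congr 1
  apply List.map_congr_left
  intro k _
  simp only [Function.comp]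
  have e2 : (1 : Int) + (k : Int) = ((k + 1 : Nat) : Int) := by push_cast; ring
  have e1 : ((k + 1 : Nat) : Int) - 1 = ((k : Nat) : Int) := by push_cast; ring
  have e3 : ((k + 1 : Nat) : Int) + 1 = ((k + 2 : Nat) : Int) := by push_cast; ring
  simp only [e2, e1, e3, PySem.List.pyGetD_natCast]

lemma sum_eq_turnSum (sr : List Int) : find_turn_count sr = turnSum sr := by
  induction sr using turnSum.induct with
  | case1 a b c t ih =>
    cases t with
    | nil =>
      rw [a_sum [a, b, c] (by simp)]
      simp [turnSum, List.range_succ]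
    | cons d t' =>
      rw [a_sum (a :: b :: c :: d :: t') (by simp), turnSum, ← ih,
        a_sum (b :: c :: d :: t') (by simp)]
      have hlen : (a :: b :: c :: d :: t').length - 2 = ((b :: c :: d :: t').length - 2) + 1 := by
        simp
      rw [hlen, List.range_succ_eq_map, List.map_cons, List.sum_cons, List.map_map]
      simp only [List.getD_cons_zero, List.getD_cons_succ]
      congr 1
  | case2 x hx =>
    match x with
    | [] => rfl
    | [a] => rfl
    | [a, b] => rfl
    | a :: b :: c :: t => exact (hx a b c t rfl).elim

-- ===== VERDICT (by name: the statement is the Claim_ definition above) =====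
theorem find_turn_count_spec : Claim_equal_find_turn_count := by
  intro sr _
  unfold Spec_find_turn_count
  rw [alt_eq_turnSum, sum_eq_turnSum]
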